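-- pv_equiv track=rewrite | github.com/amirrosen1/Word-Search | wordsearch.py | search_words_and_count
-- ===== SOURCE A (Python) =====
-- def search_words_and_count(words, matrix_lst, good_words_lst):
--
--     """
--     The function gets the word list, the letter matrix, and an empty list.
--     :param words: Word list.
--     :param matrix_lst: Letter matrix.
--     :param good_words_lst: An empty list.
--     :return: The function returns a dictionary that contains the words
--      found in each search, and the amount of each word found in that
--      search.
--     """
--
--     count = 0
--     for word in words:
--         word_count = 0
--         for line in matrix_lst:
--             for i in range(len(line)):
--                 for j in range(len(word)):
--                     if i + j < len(line):
--                         if word[j] == line[i + j]: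
--                             count += 1
--                 if count == len(word):
--                     word_count += 1
--                 count = 0
--             count = 0
--         if word_count > 0:
--             good_words_lst.append((word, word_count))
--     new_dict = dict(good_words_lst)
--     return new_dict
-- ===== SOURCE B (Python) =====
-- def search_words_and_count(words, matrix_lst, good_words_lst):
--     for word in words:
--         total = 0
--         for line in matrix_lst:
--             i = line.find(word)
--             while 0 <= i < len(line):
--                 total += 1
--                 i = line.find(word, i + 1)
--         if total > 0:
--             good_words_lst.append((word, total))
--     return dict(good_words_lst)
-- ===== Notes on version B (the rewrite author's own statement) =====
-- stated objective: faster
-- what changed: B replaces A's four nested loops (char-by-char compare with a match counter at every position of every line) by a find-jump loop that hops from one occurrence to the next with str.find per word per line.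
import Mathlib
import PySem

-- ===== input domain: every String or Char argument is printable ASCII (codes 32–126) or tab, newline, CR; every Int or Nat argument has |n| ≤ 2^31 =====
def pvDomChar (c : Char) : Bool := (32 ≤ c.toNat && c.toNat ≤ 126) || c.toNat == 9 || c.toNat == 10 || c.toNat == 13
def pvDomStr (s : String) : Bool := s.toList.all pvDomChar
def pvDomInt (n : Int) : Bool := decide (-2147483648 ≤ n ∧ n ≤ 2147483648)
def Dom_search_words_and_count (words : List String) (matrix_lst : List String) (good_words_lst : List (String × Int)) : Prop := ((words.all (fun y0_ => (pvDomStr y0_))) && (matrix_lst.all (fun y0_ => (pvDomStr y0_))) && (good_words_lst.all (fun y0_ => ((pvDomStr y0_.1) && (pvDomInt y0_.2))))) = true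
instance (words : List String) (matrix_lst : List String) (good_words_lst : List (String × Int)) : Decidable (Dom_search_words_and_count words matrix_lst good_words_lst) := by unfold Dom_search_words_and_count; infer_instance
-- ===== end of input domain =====

-- B replaces A's four nested scanning loops by a find-jump loop over occurrence positions
-- (Python str.find per word per line); objective: faster (constant-factor). A mutates
-- good_words_lst by appending; B performs the same appends; the theorem is about the return value.


-- ===== PORT A =====
-- 'for j in range(len(word)): if i+j < len(line): if word[j] == line[i+j]: count += 1'
-- (word[j] and line[i+j] are always in range when read; pyGetD's default is never used)
def aInner (word line : List Char) (i : Int) (count : Int) : Int :=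
  (PySem.List.pyRange 0 (word.length : Int)).foldl
    (fun c j =>
      if i + j < (line.length : Int) then
        if PySem.List.pyGetD word j 'a' == PySem.List.pyGetD line (i + j) 'a' then c + 1 else c
      else c) count

-- the body of 'for line in matrix_lst', state = (count, word_count)
def aLine (word : List Char) (p : Int × Int) (line : List Char) : Int × Int :=
  let q := (PySem.List.pyRange 0 (line.length : Int)).foldl
    (fun (q : Int × Int) i =>
      let count := aInner word line i q.1
      (0, if count == (word.length : Int) then q.2 + 1 else q.2)) p
  (0, q.2)

def search_words_and_count (words : List String) (matrix_lst : List String) (good_words_lst : List (String × Int)) : List (String × Int) :=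
  let lst := words.foldl
    (fun acc word =>
      let p := matrix_lst.foldl (fun p line => aLine word.toList p line.toList) (0, 0)
      let word_count := p.2
      if word_count > 0 then acc ++ [(word, word_count)] else acc) good_words_lst
  (PySem.Dict.ofList lst).items

-- ===== PORT B =====
-- 'i = line.find(word); while 0 <= i < len(line): total += 1; i = line.find(word, i+1)'
-- fuel (line length + 1) only makes the loop structurally total; it is never exhausted
def bLoop (line word : List Char) (fuel : Nat) (i : Int) (total : Int) : Int :=
  match fuel with
  | 0 => total
  | fuel + 1 =>
    if 0 ≤ i ∧ i < (line.length : Int) then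
      bLoop line word fuel (PySem.Chars.findFrom line word (i + 1)) (total + 1)
    else total

def search_words_and_count_alt (words : List String) (matrix_lst : List String) (good_words_lst : List (String × Int)) : List (String × Int) :=
  let lst := words.foldl
    (fun acc word =>
      let total := matrix_lst.foldl
        (fun t line => bLoop line.toList word.toList (line.toList.length + 1)
          (PySem.Chars.find line.toList word.toList) t) 0
      if total > 0 then acc ++ [(word, total)] else acc) good_words_lst
  (PySem.Dict.ofList lst).items

-- ===== PRECONDITION & SPEC =====
def Spec_search_words_and_count (words : List String) (matrix_lst : List String) (good_words_lst : List (String × Int)) (out : List (String × Int)) : Prop := out = search_words_and_count_alt words matrix_lst good_words_lst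
instance (words : List String) (matrix_lst : List String) (good_words_lst : List (String × Int)) (out : List (String × Int)) : Decidable (Spec_search_words_and_count words matrix_lst good_words_lst out) := by unfold Spec_search_words_and_count; infer_instance

-- ===== CLAIM (what is proved, stated in full; the proofs are below) =====
def Claim_equal_search_words_and_count : Prop := ∀ (words : List String) (matrix_lst : List String) (good_words_lst : List (String × Int)), Dom_search_words_and_count words matrix_lst good_words_lst → Spec_search_words_and_count words matrix_lst good_words_lst (search_words_and_count words matrix_lst good_words_lst)

-- ===== LEMMAS AND PROOFS =====

-- number of (overlapping) occurrence positions of `word` in `line` among 0 <= i < len(line)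
def occCnt (word line : List Char) : Nat :=
  (List.range line.length).countP (fun i => decide (word <+: line.drop i))

theorem prefix_drop_iff (word line : List Char) (i : Nat) :
    word <+: line.drop i ↔ (∀ j < word.length, i + j < line.length ∧ word.getD j 'a' = line.getD (i+j) 'a') := by
  constructor
  · rintro ⟨t, ht⟩ j hj
    have hlen : word.length + t.length = line.length - i := by
      have := congrArg List.length ht
      simpa using this
    have hn : i + j < line.length := by omega
    refine ⟨hn, ?_⟩
    have h1 : (line.drop i).getD j 'a' = word.getD j 'a' := by
      rw [← ht]; rw [List.getD_append _ _ _ _ hj]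
    have h2 : (line.drop i).getD j 'a' = line.getD (i+j) 'a' := by
      simp [List.getD_eq_getElem?_getD, List.getElem?_drop]
    rw [← h1, h2]
  · intro h
    rw [List.prefix_iff_eq_take]
    apply List.ext_getElem
    · simp
      rcases Nat.eq_zero_or_pos word.length with h0 | h0
      · omega
      · have := (h (word.length - 1) (by omega)).1
        omega
    · intro j hj1 hj2
      have hj : j < word.length := hj1
      obtain ⟨hn, he⟩ := h j hj
      simp only [List.getElem_take, List.getElem_drop]
      rw [List.getD_eq_getElem _ _ hj, List.getD_eq_getElem _ _ hn] at he
      exact he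

theorem aInner_eq_len_iff (word line : List Char) (i : Nat) :
    (aInner word line (i : Int) 0 = (word.length : Int)) ↔ word <+: line.drop i := by
  unfold aInner
  rw [PySem.List.pyRange_zero_natCast, List.foldl_map]
  have hstep : ∀ (c : Int) (j : Nat),
      (fun (c : Int) (j : Nat) =>
        if (i : Int) + (j : Int) < (line.length : Int) then
          if PySem.List.pyGetD word (j : Int) 'a' == PySem.List.pyGetD line ((i : Int) + (j : Int)) 'a' then c + 1 else c
        else c) c j
      = (fun (c : Int) (j : Nat) =>
          if (i + j < line.length ∧ word.getD j 'a' = line.getD (i+j) 'a') then c + 1 else c) c j := by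
    intro c j
    have hij : (i : Int) + (j : Int) = ((i + j : Nat) : Int) := by push_cast; ring
    simp only [hij, PySem.List.pyGetD_natCast, Nat.cast_lt, beq_iff_eq]
    by_cases h1 : i + j < line.length
    · simp [h1]
    · simp [h1]
  rw [funext (fun c => funext (hstep c))]
  rw [PySem.List.foldl_ite_add_one, zero_add, prefix_drop_iff]
  constructor
  · intro h j hj
    have hc : (List.range word.length).countP
        (fun j => decide (i + j < line.length ∧ word.getD j 'a' = line.getD (i+j) 'a')) = word.length := by
      exact_mod_cast h
    have h2 := List.countP_eq_length.mp (by rw [hc]; simp)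
    simpa using h2 j (List.mem_range.mpr hj)
  · intro h
    have hc : (List.range word.length).countP
        (fun j => decide (i + j < line.length ∧ word.getD j 'a' = line.getD (i+j) 'a'))
        = (List.range word.length).length :=
      List.countP_eq_length.mpr (fun j hj => by simpa using h j (List.mem_range.mp hj))
    rw [List.length_range] at hc
    exact_mod_cast hc

theorem aLine_eq (word line : List Char) (wc : Int) :
    aLine word (0, wc) line = (0, wc + (occCnt word line : Int)) := by
  unfold aLine occCnt
  rw [PySem.List.pyRange_zero_natCast, List.foldl_map]
  suffices h : ∀ (l : List Nat) (wc : Int),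
      l.foldl (fun (q : Int × Int) (i : Nat) =>
        (0, if aInner word line (i : Int) q.1 == (word.length : Int) then q.2 + 1 else q.2)) (0, wc)
      = (0, wc + ((l.countP (fun i => decide (word <+: line.drop i)) : Nat) : Int)) by
    simpa using congrArg Prod.snd (h (List.range line.length) wc)
  intro l
  induction l with
  | nil => intro wc; simp
  | cons i l ih =>
    intro wc
    simp only [List.foldl_cons]
    rw [ih]
    by_cases hp : word <+: line.drop i
    · rw [if_pos (by simpa [beq_iff_eq] using (aInner_eq_len_iff word line i).mpr hp)]
      rw [List.countP_cons]
      simp [hp]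
      ring
    · rw [if_neg (by simpa [beq_iff_eq] using fun hc => hp ((aInner_eq_len_iff word line i).mp hc))]
      rw [List.countP_cons]
      simp [hp]

theorem prefix_drop_infix (line word : List Char) (k i : Nat) (hki : k ≤ i)
    (h : word <+: line.drop i) : word <:+: line.drop k := by
  obtain ⟨t, ht⟩ := h
  obtain ⟨u, hu⟩ := List.drop_suffix (i - k) (line.drop k)
  rw [List.drop_drop, show k + (i - k) = i by omega] at hu
  exact ⟨u, t, by rw [List.append_assoc, ht, hu]⟩

theorem bLoop_eq (line word : List Char) :
    ∀ (fuel k : Nat), k ≤ line.length → line.length + 1 - k ≤ fuel → ∀ (t : Int),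
    bLoop line word fuel (PySem.Chars.findFrom line word (k : Int)) t
      = t + ((List.range' k (line.length - k)).countP (fun i => decide (word <+: line.drop i)) : Int) := by
  intro fuel
  induction fuel with
  | zero => intro k hk hf t; exact absurd hf (by omega)
  | succ fuel ih =>
    intro k hk hf t
    by_cases hr : PySem.Chars.findFrom line word (k : Int) = -1
    · have hninf : ¬ word <:+: line.drop k :=
        (PySem.Chars.findFrom_natCast_eq_neg_one_iff line word k hk).mp hr
      have hcnt : (List.range' k (line.length - k)).countP
          (fun i => decide (word <+: line.drop i)) = 0 := by
        apply List.countP_eq_zero.mpr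
        intro i hi
        simp only [decide_eq_true_eq]
        intro hp
        exact hninf (prefix_drop_infix line word k i (List.mem_range'_1.mp hi).1 hp)
      rw [hr, hcnt]
      simp [bLoop]
    · have hspec := PySem.Chars.findFrom_natCast_spec line word k hk hr
      obtain ⟨hkr, hpre, hmin⟩ := hspec
      set r := PySem.Chars.findFrom line word (k : Int) with hrdef
      have hr0 : 0 ≤ r := le_trans (by exact_mod_cast Nat.zero_le k) hkr
      have hrn : r ≤ (line.length : Int) := by
        rw [hrdef, PySem.Chars.findFrom_natCast line word k hk]
        split
        · omega
        · have := PySem.Chars.find_le_length (line.drop k) word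
          simp only [List.length_drop] at this
          omega
      have hkrn : k ≤ r.toNat := by omega
      have hrton : (r.toNat : Int) = r := Int.toNat_of_nonneg hr0
      by_cases hke : k = line.length
      · -- at the very end: r = length, loop condition fails, no positions remain
        have hre : r = (line.length : Int) := le_antisymm hrn (by omega)
        subst hke
        simp only [bLoop, hre]
        rw [if_neg (by omega)]
        simp
      · have hklt : k < line.length := by omega
        have hrltn : r.toNat < line.length := by
          by_contra hcon
          have hrne : r.toNat = line.length := by omega
          have hw : word = [] := by
            have := hpre
            rw [hrne, List.drop_length] at this
            exact List.prefix_nil.mp this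
          exact (hmin k (le_refl k) (by omega)) (by simp [hw])
        have hstep : bLoop line word (fuel + 1) r t
            = bLoop line word fuel (PySem.Chars.findFrom line word (r + 1)) (t + 1) := by
          simp only [bLoop]
          rw [if_pos ⟨hr0, by omega⟩]
        rw [hstep]
        have hr1 : r + 1 = ((r.toNat + 1 : Nat) : Int) := by omega
        rw [hr1, ih (r.toNat + 1) (by omega) (by omega) (t + 1)]
        -- split the position range at r.toNat
        have hsplit : List.range' k (line.length - k)
            = List.range' k (r.toNat - k) ++ r.toNat :: List.range' (r.toNat + 1) (line.length - (r.toNat + 1)) := by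
          rw [← List.range'_succ]
          have h2 := List.range'_append (s := k) (m := r.toNat - k)
            (n := line.length - r.toNat) (step := 1)
          rw [show k + 1 * (r.toNat - k) = r.toNat by omega,
              show (r.toNat - k) + (line.length - r.toNat) = line.length - k by omega] at h2
          rw [← h2]
          rw [show line.length - (r.toNat + 1) + 1 = line.length - r.toNat by omega]
        rw [hsplit]
        rw [List.countP_append, List.countP_cons]
        have hc1 : (List.range' k (r.toNat - k)).countP
            (fun i => decide (word <+: line.drop i)) = 0 := by
          apply List.countP_eq_zero.mpr
          intro i hi
          simp only [decide_eq_true_eq]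
          have := List.mem_range'_1.mp hi
          exact hmin i this.1 (by omega)
        rw [hc1]
        simp only [decide_eq_true_eq]
        rw [if_pos hpre]
        push_cast
        ring

theorem bLine_eq (word line : List Char) (t : Int) :
    bLoop line word (line.length + 1) (PySem.Chars.find line word) t
      = t + (occCnt word line : Int) := by
  have h0 := bLoop_eq line word (line.length + 1) 0 (Nat.zero_le _) (by omega) t
  rw [Nat.cast_zero, PySem.Chars.findFrom_zero] at h0
  rw [h0]
  unfold occCnt
  rw [List.range_eq_range']
  simp

theorem aSide_eq (word : List Char) (ms : List String) :
    ∀ (wc : Int), ms.foldl (fun p line => aLine word p line.toList) (0, wc)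
      = (0, ms.foldl (fun t line => t + (occCnt word line.toList : Int)) wc) := by
  induction ms with
  | nil => intro wc; simp
  | cons m ms ih =>
    intro wc
    simp only [List.foldl_cons]
    rw [aLine_eq, ih]

theorem perWord_eq (word : List Char) (matrix_lst : List String) :
    (matrix_lst.foldl (fun p line => aLine word p line.toList) ((0 : Int), (0 : Int))).2
      = matrix_lst.foldl
          (fun t line => bLoop line.toList word (line.toList.length + 1)
            (PySem.Chars.find line.toList word) t) 0 := by
  rw [aSide_eq]
  have : (fun (t : Int) (line : String) => bLoop line.toList word (line.toList.length + 1)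
      (PySem.Chars.find line.toList word) t)
      = fun (t : Int) (line : String) => t + (occCnt word line.toList : Int) := by
    funext t line
    exact bLine_eq word line.toList t
  rw [this]

-- ===== VERDICT (by name: the statement is the Claim_ definition above) =====
theorem search_words_and_count_spec : Claim_equal_search_words_and_count := by
  intro words matrix_lst good_words_lst _
  unfold Spec_search_words_and_count search_words_and_count search_words_and_count_alt
  have h : ∀ (acc : List (String × Int)) (word : String),
      (fun acc (word : String) =>
        let p := matrix_lst.foldl (fun p line => aLine word.toList p line.toList) ((0:Int), (0:Int))
        let word_count := p.2
        if word_count > 0 then acc ++ [(word, word_count)] else acc) acc word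
      = (fun acc (word : String) =>
        let total := matrix_lst.foldl
          (fun t line => bLoop line.toList word.toList (line.toList.length + 1)
            (PySem.Chars.find line.toList word.toList) t) 0
        if total > 0 then acc ++ [(word, total)] else acc) acc word := by
    intro acc word
    simp only [perWord_eq word.toList matrix_lst]
  rw [funext (fun acc => funext (h acc))]
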